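-- pv_equiv track=rewrite | github.com/bgppa/python_workout | ch2_strings/ex7.py | ubbi_dubbi
-- ===== SOURCE A (Python) =====
-- def ubbi_dubbi (word):
--     '''
--     Translate a single word into ubbi dubbi equivalent
--     I: word, a string
--     O: a string intended as the translation
--     '''
--     as_list = []
--     for char in word:
--         if char in 'aeiou':
--             as_list.append('ub')
--         as_list.append(char)
--
--     result = ''.join(as_list)
--     return result
-- ===== SOURCE B (Python) =====
-- import re
--
-- def ubbi_dubbi(word):
--     '''
--     Translate a single word into ubbi dubbi equivalent
--     I: word, a string
--     O: a string intended as the translation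
--     '''
--     return re.sub(r'([aeiou])', r'ub\1', word)
-- ===== Notes on version B (the rewrite author's own statement) =====
-- stated objective: idiomatic
-- what changed: Replaced the explicit character loop with list accumulation and join by a single regex substitution that prefixes every lowercase vowel with 'ub'.
import Mathlib
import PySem

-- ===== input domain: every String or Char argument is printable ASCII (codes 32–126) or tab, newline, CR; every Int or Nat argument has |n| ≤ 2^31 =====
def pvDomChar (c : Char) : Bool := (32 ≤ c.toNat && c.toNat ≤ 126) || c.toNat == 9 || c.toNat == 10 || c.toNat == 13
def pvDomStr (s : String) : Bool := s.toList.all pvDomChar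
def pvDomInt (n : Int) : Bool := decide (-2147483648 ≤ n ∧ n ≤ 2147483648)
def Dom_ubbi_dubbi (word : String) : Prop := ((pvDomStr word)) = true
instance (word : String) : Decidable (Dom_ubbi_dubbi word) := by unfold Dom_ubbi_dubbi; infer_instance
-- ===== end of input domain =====

-- B replaces A's explicit loop/list/join with a single regex substitution prefixing each lowercase vowel with 'ub' (idiomatic, same cost).
-- B replaces A's explicit loop/list-accumulation/join with a single regex substitution prefixing each lowercase vowel with 'ub' (idiomatic, same cost).
-- ===== PORT A =====
-- for char in word: if char in 'aeiou': as_list.append('ub'); as_list.append(char); return ''.join(as_list)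
def ubbi_dubbi (word : String) : String :=
  let as_list := word.toList.foldl (fun acc char =>
    (if PySem.Chars.isIn [char] "aeiou".toList then acc ++ ["ub"] else acc)
      ++ [String.ofList [char]]) ([] : List String)
  PySem.Str.join "" as_list

-- ===== PORT B =====
-- re.sub(r'([aeiou])', r'ub\1', word): the pattern matches exactly one vowel character,
-- so the substitution is the per-character expansion vowel c ↦ "ub" ++ c, other chars kept.
def ubbi_dubbi_alt (word : String) : String :=
  String.ofList (word.toList.flatMap (fun c =>
    if c ∈ ['a','e','i','o','u'] then ['u','b',c] else [c]))

-- ===== PRECONDITION & SPEC =====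
def Spec_ubbi_dubbi (word : String) (out : String) : Prop := out = ubbi_dubbi_alt word
instance (word : String) (out : String) : Decidable (Spec_ubbi_dubbi word out) := by unfold Spec_ubbi_dubbi; infer_instance

-- ===== CLAIM (what is proved, stated in full; the proofs are below) =====
def Claim_equal_ubbi_dubbi : Prop := ∀ (word : String), Dom_ubbi_dubbi word → Spec_ubbi_dubbi word (ubbi_dubbi word)

-- ===== LEMMAS AND PROOFS =====
theorem pv_join_nil (parts : List (List Char)) :
    PySem.Chars.join [] parts = parts.flatten := by
  induction parts with
  | nil => rfl
  | cons h t ih =>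
    cases t with
    | nil => simp [PySem.Chars.join, List.intercalate]
    | cons h2 t2 =>
      simp [PySem.Chars.join, List.intercalate, List.intersperse] at *
      simpa using ih

theorem pv_isIn_singleton (c : Char) (vs : List Char) :
    PySem.Chars.isIn [c] vs = decide (c ∈ vs) := by
  by_cases h : c ∈ vs
  · simp [h]
    rw [PySem.Chars.isIn_iff_infix]
    rcases List.mem_iff_append.mp h with ⟨s, t, rfl⟩
    exact ⟨s, t, by simp⟩
  · simp [h]
    rw [PySem.Chars.isIn_eq_false_iff]
    intro hinf
    exact h (hinf.sublist.subset (by simp))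

theorem pv_toList_empty : "".toList = [] := by decide

theorem pv_toList_ub : "ub".toList = ['u','b'] := by decide

theorem pv_foldl_flatten (l : List Char) (acc : List String) :
    ((l.foldl (fun acc char =>
      (if PySem.Chars.isIn [char] "aeiou".toList then acc ++ ["ub"] else acc)
        ++ [String.ofList [char]]) acc).map String.toList).flatten
    = (acc.map String.toList).flatten ++ l.flatMap (fun c =>
        if c ∈ ['a','e','i','o','u'] then ['u','b',c] else [c]) := by
  induction l generalizing acc with
  | nil => simp
  | cons c t ih =>
    rw [List.foldl_cons, ih, pv_isIn_singleton]
    by_cases h : c ∈ ['a','e','i','o','u'] <;>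
      · simp only [List.mem_cons, List.not_mem_nil, or_false] at h
        simp [h, pv_toList_ub, String.toList_ofList]

-- ===== VERDICT (by name: the statement is the Claim_ definition above) =====
theorem ubbi_dubbi_spec : Claim_equal_ubbi_dubbi := by
  intro word _
  unfold Spec_ubbi_dubbi ubbi_dubbi ubbi_dubbi_alt
  show String.ofList (PySem.Chars.join "".toList _) = _
  rw [pv_toList_empty, pv_join_nil, pv_foldl_flatten]
  simp
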